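-- pv_equiv track=rewrite | github.com/tunaalaygut/jm-assignment-solutions | Q2/solution.py | sumOfSimilarities
-- ===== SOURCE A (Python) =====
-- def sumOfSimilarities(s):
--     '''
--     Function that given a string, calculates the sum of similarities
--     with each of its suffixes. It uses a variant of the Z-algorithm
--     to lower the runtime complexity of the task.
--
--     Args
--         s: String to find the similarities within.
--
--     Returns
--         c: The sum of similarities of a String with its suffixes.
--     '''
--     n = len(s)  # Get the size of the string.
--
--     c = n  # Number of characters in a string, by definiton,
--            # can be considered as similarities. Therefore, start
--            # counting from the size of the string.
--
--     L, R = 0, 0  # Initialize the boundaries.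
--     z = [0] * n  # Initialize (with all 0's) the Z-array which is the
--                  # core of the Z-algorithm.
--
--     for i in range(1, n):
--         if (i > R):
--             L = R = i
--
--             while ((R < n) and (s[R-L] == s[R])): R+=1
--             z[i] = R-L
--             R-=1
--             c+=z[i]
--         else:
--             k = i-L
--             if(z[k] < R-i+1):
--                 z[i] = z[k]
--                 c +=z[i]
--             else:
--                 L = i
--
--                 while ((R < n) and (s[R-L] == s[R])): R+=1
--                 z[i] = R-L
--                 R-=1
--                 c+=z[i]
--
--     return c  # Return the result.
-- ===== SOURCE B (Python) =====
-- def sumOfSimilarities(s):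
--     """Sum over every suffix of s of its common-prefix length with s,
--     measured directly by a naive nested scan (no Z-array, no [L,R] window)."""
--     n = len(s)
--     c = 0
--     for i in range(n):
--         j = 0
--         while i + j < n and s[j] == s[i + j]:
--             j += 1
--         c += j
--     return c
-- ===== Notes on version B (the rewrite author's own statement) =====
-- stated objective: simpler
-- what changed: Replaces the windowed Z-algorithm (Z-array plus [L,R] box bookkeeping) with a direct nested scan that measures the common-prefix length of s with each suffix and sums them.
import Mathlib
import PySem

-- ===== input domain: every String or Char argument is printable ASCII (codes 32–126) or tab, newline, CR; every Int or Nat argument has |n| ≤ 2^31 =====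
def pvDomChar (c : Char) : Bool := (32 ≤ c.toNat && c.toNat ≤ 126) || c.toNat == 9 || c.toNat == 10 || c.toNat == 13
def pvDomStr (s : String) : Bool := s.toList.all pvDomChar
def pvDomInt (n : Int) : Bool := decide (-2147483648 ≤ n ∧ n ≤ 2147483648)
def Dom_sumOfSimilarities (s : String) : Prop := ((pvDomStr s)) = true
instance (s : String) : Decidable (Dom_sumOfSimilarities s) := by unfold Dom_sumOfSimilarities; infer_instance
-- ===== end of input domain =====

-- B replaces A's windowed Z-algorithm by a direct nested scan summing the
-- common-prefix length of s with each of its suffixes (simpler, not faster).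

-- ===== PORT A =====
-- `while ((R < n) and (s[R-L] == s[R])): R += 1`; both indexes are guarded
-- in range by the loop condition (0 ≤ R-L ≤ R < n), so `getD` is exact here.
-- fuel = l.length - R bounds the iteration count exactly; it only makes the
-- recursion structural and never changes the computed value.
def aWhile (l : List Char) (L R fuel : Nat) : Nat :=
  match fuel with
  | 0 => R
  | fuel + 1 =>
    if R < l.length ∧ l.getD (R - L) 'a' = l.getD R 'a' then aWhile l L (R + 1) fuel else R

-- one iteration of A's `for i in range(1, n)` body, state (L, R, z, c);
-- all these Python ints stay ≥ 0 throughout A, so Nat state is exact.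
def aStep (l : List Char) (st : Nat × Nat × List Nat × Nat) (i : Nat) :
    Nat × Nat × List Nat × Nat :=
  let (L, R, z, c) := st
  if R < i then  -- i > R
    let R' := aWhile l i i (l.length - i)
    let zi := R' - i
    (i, R' - 1, z.set i zi, c + zi)
  else
    let k := i - L
    if z.getD k 0 < R - i + 1 then
      (L, R, z.set i (z.getD k 0), c + z.getD k 0)
    else
      let R' := aWhile l i R (l.length - R)
      let zi := R' - i
      (i, R' - 1, z.set i zi, c + zi)

def sumOfSimilarities (s : String) : Int :=
  let l := s.toList
  let n := l.length
  -- range(1, n) as the Nat list [1, …, n-1]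
  let st := (List.range' 1 (n - 1)).foldl (aStep l) (0, 0, List.replicate n 0, n)
  (st.2.2.2 : Int)

-- ===== PORT B =====
-- `while i + j < n and s[j] == s[i+j]: j += 1`; indexes guarded in range.
-- fuel = l.length - (i + j) bounds the iteration count exactly (see aWhile).
def bWhile (l : List Char) (i j fuel : Nat) : Nat :=
  match fuel with
  | 0 => j
  | fuel + 1 =>
    if i + j < l.length ∧ l.getD j 'a' = l.getD (i + j) 'a' then bWhile l i (j + 1) fuel else j

def sumOfSimilarities_alt (s : String) : Int :=
  let l := s.toList
  (((List.range l.length).foldl (fun c i => c + bWhile l i 0 (l.length - i)) 0 : Nat) : Int)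

-- ===== PRECONDITION & SPEC =====
def Spec_sumOfSimilarities (s : String) (out : Int) : Prop := out = sumOfSimilarities_alt s
instance (s : String) (out : Int) : Decidable (Spec_sumOfSimilarities s out) := by unfold Spec_sumOfSimilarities; infer_instance

-- ===== CLAIM (what is proved, stated in full; the proofs are below) =====
def Claim_equal_sumOfSimilarities : Prop := ∀ (s : String), Dom_sumOfSimilarities s → Spec_sumOfSimilarities s (sumOfSimilarities s)

-- ===== LEMMAS AND PROOFS =====

-- common-prefix length of two lists
def cpl : List Char → List Char → Nat
  | a :: x, b :: y => if a = b then cpl x y + 1 else 0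
  | _, _ => 0

-- Z-function value: similarity of l with its suffix from i
def zf (l : List Char) (i : Nat) : Nat := cpl l (l.drop i)

theorem cpl_self (l : List Char) : cpl l l = l.length := by
  induction l with
  | nil => simp [cpl]
  | cons a x ih => simp [cpl, ih]

theorem cpl_le_right : ∀ (x y : List Char), cpl x y ≤ y.length := by
  intro x; induction x with
  | nil => intro y; cases y <;> simp [cpl]
  | cons a x ih =>
    intro y; cases y with
    | nil => simp [cpl]
    | cons b y =>
      simp only [cpl]; split
      · simpa using ih y
      · simp

theorem take_cpl : ∀ (x y : List Char) (j : Nat), j ≤ cpl x y → x.take j = y.take j := by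
  intro x; induction x with
  | nil => intro y j h; cases y <;> simp_all [cpl]
  | cons a x ih =>
    intro y j h
    cases y with
    | nil => simp_all [cpl]
    | cons b y =>
      cases j with
      | zero => simp
      | succ j =>
        simp only [cpl] at h
        split at h
        · next hab => simp [List.take_succ_cons, hab, ih y j (by omega)]
        · omega

theorem cpl_eq : ∀ (x y : List Char) (j : Nat), j ≤ x.length → j ≤ y.length →
    x.take j = y.take j →
    (j = x.length ∨ j = y.length ∨ x.getD j 'a' ≠ y.getD j 'a') → cpl x y = j := by
  intro x; induction x with
  | nil =>
    intro y j hx _ _ _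
    have hj : j = 0 := by simpa using hx
    subst hj; cases y <;> simp [cpl]
  | cons a x ih =>
    intro y j hx hy htake hstop
    cases y with
    | nil =>
      have hj : j = 0 := by simpa using hy
      subst hj; simp [cpl]
    | cons b y =>
      cases j with
      | zero =>
        rcases hstop with h | h | h
        · simp at h
        · simp at h
        · simp only [List.getD_cons_zero] at h; simp [cpl, h]
      | succ j =>
        simp only [List.take_succ_cons, List.cons.injEq] at htake
        obtain ⟨hab, ht⟩ := htake
        simp only [cpl, if_pos hab]
        have := ih y j (by simpa using hx) (by simpa using hy) ht (by
          rcases hstop with h | h | h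
          · left; simpa using h
          · right; left; simpa using h
          · right; right; simpa [List.getD_cons_succ] using h)
        omega

theorem cpl_stop : ∀ (x y : List Char),
    cpl x y = x.length ∨ cpl x y = y.length ∨ x.getD (cpl x y) 'a' ≠ y.getD (cpl x y) 'a' := by
  intro x; induction x with
  | nil => intro y; simp [cpl]
  | cons a x ih =>
    intro y
    cases y with
    | nil => right; left; cases x <;> simp [cpl]
    | cons b y =>
      by_cases hab : a = b
      · simp only [cpl, if_pos hab]
        rcases ih y with h | h | h
        · left; simp [h]
        · right; left; simp [h]
        · right; right; simpa [List.getD_cons_succ] using h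
      · right; right; simp [cpl, hab]

theorem getD_of_take_eq {x y : List Char} {m j : Nat} (h : x.take m = y.take m)
    (hj : j < m) : x.getD j 'a' = y.getD j 'a' := by
  have : (x.take m).getD j 'a' = (y.take m).getD j 'a' := by rw [h]
  simpa [List.getD, List.getElem?_take, hj] using this

-- the scan loop computes L + zf l L once the first R-L characters match
theorem aWhile_cpl (l : List Char) (L : Nat) : ∀ fuel R, l.length - R ≤ fuel →
    L ≤ R → R ≤ l.length →
    l.take (R - L) = (l.drop L).take (R - L) → aWhile l L R fuel = L + zf l L := by
  intro fuel
  induction fuel with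
  | zero =>
    intro R hfu hLR hRn htake
    have hR : R = l.length := by omega
    have hdl : (l.drop L).length = l.length - L := by simp
    have : cpl l (l.drop L) = R - L := by
      apply cpl_eq _ _ _ (by omega) (by omega) htake
      right; left; omega
    simp only [aWhile, zf]
    omega
  | succ fuel ih =>
  intro R hfu hLR hRn htake
  rw [aWhile]
  split
  · next hcond =>
    obtain ⟨hRlt, heq⟩ := hcond
    have hdl : (l.drop L).length = l.length - L := by simp
    have htake' : l.take (R + 1 - L) = (l.drop L).take (R + 1 - L) := by
      have h1 : R + 1 - L = (R - L) + 1 := by omega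
      rw [h1, List.take_add_one, List.take_add_one, htake]
      congr 1
      have : (l.drop L)[R - L]? = l[L + (R - L)]? := List.getElem?_drop ..
      rw [this]
      have hL : L + (R - L) = R := by omega
      rw [hL]
      have h2 : l[R - L]? = some (l.getD (R - L) 'a') := by
        simp [List.getD, List.getElem?_eq_getElem (by omega : R - L < l.length)]
      have h3 : l[R]? = some (l.getD R 'a') := by
        simp [List.getD, List.getElem?_eq_getElem hRlt]
      rw [h2, h3, heq]
    exact ih (R + 1) (by omega) (by omega) (by omega) htake'
  · next hcond =>
    push Not at hcond
    have hdl : (l.drop L).length = l.length - L := by simp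
    have : cpl l (l.drop L) = R - L := by
      apply cpl_eq _ _ _ (by omega) (by omega) htake
      by_cases hR : R < l.length
      · right; right
        have := hcond hR
        have hy : (l.drop L).getD (R - L) 'a' = l.getD R 'a' := by
          have h1 : (l.drop L)[R - L]? = l[L + (R - L)]? := List.getElem?_drop ..
          have hL : L + (R - L) = R := by omega
          simp [List.getD, h1, hL]
        rw [hy]; exact this
      · right; left; omega
    simp only [zf]; omega

theorem bWhile_eq_aWhile (l : List Char) (i : Nat) : ∀ fuel j,
    bWhile l i j fuel = aWhile l i (i + j) fuel - i := by
  intro fuel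
  induction fuel with
  | zero => intro j; simp [bWhile, aWhile]
  | succ fuel ih =>
    intro j
    rw [bWhile, aWhile]
    have hij : i + j - i = j := by omega
    rw [hij]
    by_cases hc : i + j < l.length ∧ l.getD j 'a' = l.getD (i + j) 'a'
    · rw [if_pos hc, if_pos hc]
      have := ih (j + 1)
      rw [show i + (j + 1) = i + j + 1 by omega] at this
      exact this
    · rw [if_neg hc, if_neg hc]; omega

theorem bWhile_zf (l : List Char) (i : Nat) (hi : i ≤ l.length) :
    bWhile l i 0 (l.length - i) = zf l i := by
  rw [bWhile_eq_aWhile]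
  rw [aWhile_cpl l i (l.length - i) (i + 0) (by omega) (by omega) (by omega) (by simp)]
  omega

-- A's loop invariant before processing index i
def AInv (l : List Char) (i : Nat) (st : Nat × Nat × List Nat × Nat) : Prop :=
  match st with
  | (L, R, z, c) =>
    c = l.length + ((List.range' 1 (i - 1)).map (zf l)).sum ∧
    z.length = l.length ∧
    (∀ t, 1 ≤ t → t < i → z.getD t 0 = zf l t) ∧
    (i ≤ R → 1 ≤ L ∧ L < i ∧ R + 1 = L + zf l L)

-- the window [L, R] matches the prefix of l
theorem window_take (l : List Char) (L R : Nat) (hw : R + 1 = L + zf l L) :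
    l.take (R + 1 - L) = (l.drop L).take (R + 1 - L) :=
  take_cpl l (l.drop L) (R + 1 - L) (by simp only [zf] at hw; omega)

-- the key shift: inside the window, suffix i matches suffix k = i - L
theorem shift_take (l : List Char) (L R i : Nat) (hL : L ≤ i) (hiR : i ≤ R)
    (hw : R + 1 = L + zf l L) :
    (l.drop i).take (R - i) = (l.drop (i - L)).take (R - i) := by
  have hzle := cpl_le_right l (l.drop L)
  have hdl : (l.drop L).length = l.length - L := by simp
  have hRn : R < l.length := by simp only [zf] at hw; omega
  have h1 : l.drop i = (l.drop L).drop (i - L) := by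
    rw [List.drop_drop]; congr 1; omega
  have h2 : ((l.drop L).drop (i - L)).take (R - i) =
      ((l.drop L).take (R - L)).drop (i - L) := by
    rw [List.drop_take]; congr 1; omega
  have h3 : (l.drop L).take (R - L) = l.take (R - L) := by
    have hwt := window_take l L R hw
    have hRL : R - L ≤ R + 1 - L := by omega
    calc (l.drop L).take (R - L) = ((l.drop L).take (R + 1 - L)).take (R - L) := by
          rw [List.take_take, Nat.min_eq_left hRL]
      _ = (l.take (R + 1 - L)).take (R - L) := by rw [hwt]
      _ = l.take (R - L) := by rw [List.take_take, Nat.min_eq_left hRL]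
  have h4 : (l.take (R - L)).drop (i - L) = (l.drop (i - L)).take (R - i) := by
    rw [List.drop_take]; congr 1; omega
  rw [h1, h2, h3, h4]

theorem step_inv (l : List Char) (i : Nat) (st : Nat × Nat × List Nat × Nat)
    (hi1 : 1 ≤ i) (hin : i < l.length) (h : AInv l i st) :
    AInv l (i + 1) (aStep l st i) := by
  obtain ⟨L, R, z, c⟩ := st
  simp only [AInv] at h
  obtain ⟨hc, hzlen, hz, hwin⟩ := h
  have hsum : ((List.range' 1 (i + 1 - 1)).map (zf l)).sum
      = ((List.range' 1 (i - 1)).map (zf l)).sum + zf l i := by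
    rw [show i + 1 - 1 = (i - 1) + 1 from by omega, List.range'_1_concat,
      show 1 + (i - 1) = i from by omega]
    simp
  have hzset_get : ∀ v t, (z.set i v).getD t 0 = (if t = i then v else z.getD t 0) := by
    intro v t
    by_cases hti : t = i
    · subst hti
      simp [List.getD, (by omega : t < z.length)]
    · simp [List.getD, hti, Ne.symm hti]
  simp only [AInv, aStep]
  split
  · -- first branch: i > R
    have hRW : aWhile l i i (l.length - i) = i + zf l i :=
      aWhile_cpl l i (l.length - i) i (by omega) (le_refl i) (by omega) (by simp)
    try dsimp only
    refine ⟨?_, by simp [hzlen], ?_, ?_⟩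
    · rw [hc, hsum, hRW]; omega
    · intro t h1t hti
      rw [hRW, hzset_get]
      split
      · next heq => subst heq; omega
      · next heq => exact hz t h1t (by omega)
    · intro hle
      rw [hRW] at hle ⊢
      refine ⟨by omega, by omega, by omega⟩
  · -- else: i ≤ R, window valid
    next hRi =>
    have hiR : i ≤ R := by omega
    obtain ⟨hL1, hLi, hw⟩ := hwin hiR
    have hzle := cpl_le_right l (l.drop L)
    have hdl : (l.drop L).length = l.length - L := by simp
    have hRn : R < l.length := by simp only [zf] at hw; omega
    have hzk : z.getD (i - L) 0 = zf l (i - L) := hz (i - L) (by omega) (by omega)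
    split
    · -- z[k] < R - i + 1 : copy z[i] from z[k]
      next hlt =>
      rw [hzk] at hlt
      set k := i - L with hk
      have hklt : zf l k ≤ R - i := by omega
      have hshift := shift_take l L R i (by omega) hiR hw
      have htk : (l.drop i).take (zf l k) = (l.drop k).take (zf l k) := by
        calc (l.drop i).take (zf l k) = ((l.drop i).take (R - i)).take (zf l k) := by
              rw [List.take_take, Nat.min_eq_left hklt]
          _ = ((l.drop k).take (R - i)).take (zf l k) := by rw [hshift]
          _ = (l.drop k).take (zf l k) := by rw [List.take_take, Nat.min_eq_left hklt]
      have hcpl_k : cpl l (l.drop k) ≤ R - i := hklt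
      have hzi : zf l i = zf l k := by
        simp only [zf]
        apply cpl_eq
        · exact le_trans hcpl_k (by omega)
        · simp only [List.length_drop]; omega
        · exact (take_cpl l (l.drop k) (zf l k) (le_refl _)).trans htk.symm
        · -- stop condition: the characters differ at position zf l k
          right; right
          have hdk : (l.drop k).length = l.length - k := by simp
          rcases cpl_stop l (l.drop k) with hst | hst | hst
          · omega
          · rw [hdk] at hst
            -- zf l k = n - k would force n ≤ R - L < n
            exfalso; omega
          · have hd1 : (l.drop k).getD (cpl l (l.drop k)) 'a' = l.getD (k + cpl l (l.drop k)) 'a' := by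
              have h1 : (l.drop k)[cpl l (l.drop k)]? = l[k + cpl l (l.drop k)]? := List.getElem?_drop ..
              simp [List.getD, h1]
            have hd2 : (l.drop i).getD (cpl l (l.drop k)) 'a' = l.getD (i + cpl l (l.drop k)) 'a' := by
              have h1 : (l.drop i)[cpl l (l.drop k)]? = l[i + cpl l (l.drop k)]? := List.getElem?_drop ..
              simp [List.getD, h1]
            have hwd : l.getD (i + cpl l (l.drop k)) 'a' = l.getD (k + cpl l (l.drop k)) 'a' := by
              have hwt := window_take l L R hw
              have he : l.getD (i + cpl l (l.drop k) - L) 'a' = (l.drop L).getD (i + cpl l (l.drop k) - L) 'a' :=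
                getD_of_take_eq hwt (by omega)
              have h1 : (l.drop L)[i + cpl l (l.drop k) - L]? = l[L + (i + cpl l (l.drop k) - L)]? :=
                List.getElem?_drop ..
              simp only [List.getD] at he ⊢
              rw [h1, show L + (i + cpl l (l.drop k) - L) = i + cpl l (l.drop k) from by omega,
                show i + cpl l (l.drop k) - L = k + cpl l (l.drop k) from by omega] at he
              exact he.symm
            rw [hd2, hwd, ← hd1]
            exact hst
      try dsimp only
      refine ⟨?_, by simp [hzlen], ?_, ?_⟩
      · rw [hc, hsum, hzk, hzi]; omega
      · intro t h1t hti
        rw [hzset_get]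
        split
        · next heq => subst heq; rw [hzk]; exact hzi.symm
        · next heq => exact hz t h1t (by omega)
      · intro _; exact ⟨hL1, by omega, hw⟩
    · -- z[k] ≥ R - i + 1 : rescan from R with L := i
      next hge =>
      rw [hzk] at hge
      set k := i - L with hk
      have hkge : R - i + 1 ≤ zf l k := by omega
      have hshift := shift_take l L R i (by omega) hiR hw
      have htk : l.take (R - i) = (l.drop i).take (R - i) := by
        have h1 : (l.drop k).take (R - i) = l.take (R - i) :=
          (take_cpl l (l.drop k) (R - i) (by exact le_trans (by omega) hkge)).symm
        rw [hshift, h1]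
      have hRW : aWhile l i R (l.length - R) = i + zf l i :=
        aWhile_cpl l i (l.length - R) R (by omega) hiR (by omega) htk
      try dsimp only
      refine ⟨?_, by simp [hzlen], ?_, ?_⟩
      · rw [hc, hsum, hRW]; omega
      · intro t h1t hti
        rw [hRW, hzset_get]
        split
        · next heq => subst heq; omega
        · next heq => exact hz t h1t (by omega)
      · intro hle
        rw [hRW] at hle ⊢
        refine ⟨by omega, by omega, by omega⟩

theorem fold_inv (l : List Char) : ∀ m, m ≤ l.length - 1 →
    AInv l (m + 1) ((List.range' 1 m).foldl (aStep l)
      (0, 0, List.replicate l.length 0, l.length)) := by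
  intro m
  induction m with
  | zero =>
    intro _
    exact ⟨by simp, by simp, by intro t h1 h2; omega, by intro h; omega⟩
  | succ m ih =>
    intro hm
    rw [List.range'_1_concat, List.foldl_append, List.foldl_cons, List.foldl_nil]
    have h := ih (by omega)
    rw [show (1 + m) = m + 1 from Nat.add_comm 1 m]
    exact step_inv l (m + 1) _ (by omega) (by omega) h

theorem sum_range_zf (l : List Char) (hn : 1 ≤ l.length) :
    ((List.range l.length).map (zf l)).sum
      = l.length + ((List.range' 1 (l.length - 1)).map (zf l)).sum := by
  have h1 : List.range l.length = List.range' 0 l.length := List.range_eq_range'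
  have h2 : List.range' 0 l.length = 0 :: List.range' 1 (l.length - 1) := by
    rw [show l.length = (l.length - 1) + 1 from by omega, List.range'_succ]
    norm_num
  rw [h1, h2]
  simp [zf, cpl_self]

theorem foldl_add_nat (f : Nat → Nat) : ∀ (xs : List Nat) (a : Nat),
    xs.foldl (fun c i => c + f i) a = a + (xs.map f).sum := by
  intro xs
  induction xs with
  | nil => simp
  | cons x xs ih => intro a; simp [ih]; omega

-- ===== VERDICT (by name: the statement is the Claim_ definition above) =====
theorem sumOfSimilarities_spec : Claim_equal_sumOfSimilarities := by
  intro s _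
  unfold Spec_sumOfSimilarities sumOfSimilarities sumOfSimilarities_alt
  set l := s.toList with hl
  by_cases hn : l.length = 0
  · simp [hn]
  · have h1 : (List.range l.length).foldl (fun c i => c + bWhile l i 0 (l.length - i)) 0
        = ((List.range l.length).map (fun i => bWhile l i 0 (l.length - i))).sum := by
      simpa using foldl_add_nat (fun i => bWhile l i 0 (l.length - i)) (List.range l.length) 0
    have h2 : ((List.range l.length).map (fun i => bWhile l i 0 (l.length - i))).sum
        = ((List.range l.length).map (zf l)).sum := by
      congr 1
      apply List.map_congr_left
      intro i hi
      exact bWhile_zf l i (le_of_lt (List.mem_range.mp hi))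
    have h3 := fold_inv l (l.length - 1) (le_refl _)
    have h4 : l.length - 1 + 1 = l.length := by omega
    rw [h4] at h3
    obtain ⟨hc, -, -, -⟩ := h3
    simp only [h1, h2, sum_range_zf l (by omega), hc]
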